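-- pv_equiv track=rewrite | github.com/LucianoMarin/MascarasRedes | MascaraRed.py | cadenaBits
-- ===== SOURCE A (Python) =====
-- def cadenaBits(prefijo):
--     cadena=[]
--     for i in range(32):
--
--         if(i<prefijo):
--             cadena.append(1);
--
--         else:
--             cadena.append(0);
--
--
--
--     return cadena;
-- ===== SOURCE B (Python) =====
-- def cadenaBits(prefijo):
--     ones = min(32, max(0, prefijo))
--     return [1] * ones + [0] * (32 - ones)
-- ===== Notes on version B (the rewrite author's own statement) =====
-- stated objective: simpler
-- what changed: Replaces the 32-iteration loop with per-index branch by a closed-form clamp ones = min(32, max(0, prefijo)) and list replication [1]*ones + [0]*(32-ones).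
import Mathlib
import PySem

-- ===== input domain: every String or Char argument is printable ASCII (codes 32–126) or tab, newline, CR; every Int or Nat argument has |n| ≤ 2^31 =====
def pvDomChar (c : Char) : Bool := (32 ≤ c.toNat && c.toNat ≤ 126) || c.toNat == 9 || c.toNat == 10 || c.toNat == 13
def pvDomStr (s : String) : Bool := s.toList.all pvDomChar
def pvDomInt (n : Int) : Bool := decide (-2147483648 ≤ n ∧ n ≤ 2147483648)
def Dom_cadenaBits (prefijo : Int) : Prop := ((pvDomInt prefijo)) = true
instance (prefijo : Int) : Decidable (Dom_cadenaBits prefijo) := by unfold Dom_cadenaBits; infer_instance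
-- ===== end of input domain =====

-- B replaces the 32-step loop with a closed-form clamp and list replication (objective: simpler).


-- ===== PORT A =====
def cadenaBits (prefijo : Int) : List Int :=
  (PySem.List.pyRange 0 32 1).foldl
    (fun cadena i => cadena ++ [if i < prefijo then 1 else 0]) []

-- ===== PORT B =====
def cadenaBits_alt (prefijo : Int) : List Int :=
  let ones := min 32 (max 0 prefijo)
  List.replicate ones.toNat 1 ++ List.replicate (32 - ones).toNat 0

-- ===== PRECONDITION & SPEC =====
def Spec_cadenaBits (prefijo : Int) (out : List Int) : Prop := out = cadenaBits_alt prefijo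
instance (prefijo : Int) (out : List Int) : Decidable (Spec_cadenaBits prefijo out) := by unfold Spec_cadenaBits; infer_instance

-- ===== CLAIM (what is proved, stated in full; the proofs are below) =====
def Claim_equal_cadenaBits : Prop := ∀ (prefijo : Int), Dom_cadenaBits prefijo → Spec_cadenaBits prefijo (cadenaBits prefijo)

-- ===== LEMMAS AND PROOFS =====

-- Loop invariant: the fold over range(0, n) builds the clamped-prefix list.
theorem cadenaBits_fold_eq (p : Int) (n : Nat) :
    (PySem.List.pyRange 0 n 1).foldl
      (fun cadena i => cadena ++ [if i < p then 1 else 0]) ([] : List Int)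
    = List.replicate (min n (max 0 p).toNat) 1
      ++ List.replicate (n - min n (max 0 p).toNat) 0 := by
  induction n with
  | zero => simp [PySem.List.pyRange_one_eq_nil]
  | succ n ih =>
      have hsplit : PySem.List.pyRange 0 ((n + 1 : Nat) : Int) 1
          = PySem.List.pyRange 0 (n : Int) 1 ++ [(n : Int)] := by
        have := PySem.List.pyRange_one_succ_right (a := 0) (b := (n : Int))
          (by exact_mod_cast Int.natCast_nonneg n)
        push_cast
        simpa using this
      rw [hsplit, List.foldl_append, ih]
      by_cases h : (n : Int) < p
      · have hm : (max 0 p).toNat ≥ n + 1 := by omega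
        have h1 : min n (max 0 p).toNat = n := by omega
        have h2 : min (n + 1) (max 0 p).toNat = n + 1 := by omega
        simp only [List.foldl, h1, h2, if_pos h]
        simp [List.replicate_succ' (n := n)]
      · have hm : (max 0 p).toNat ≤ n := by omega
        have h1 : min n (max 0 p).toNat = (max 0 p).toNat := by omega
        have h2 : min (n + 1) (max 0 p).toNat = (max 0 p).toNat := by omega
        have h3 : n + 1 - (max 0 p).toNat = (n - (max 0 p).toNat) + 1 := by omega
        simp only [List.foldl, h1, h2, h3, if_neg h]
        rw [List.replicate_succ' (n := n - (max 0 p).toNat), List.append_assoc]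

-- B's closed form, zeta-reduced to a plain append of replicates.
theorem cadenaBits_alt_eq (p : Int) : cadenaBits_alt p =
    List.replicate (min 32 (max 0 p).toNat) 1 ++ List.replicate (32 - min 32 (max 0 p).toNat) 0 := by
  show (List.replicate (min (32 : Int) (max 0 p)).toNat 1
      ++ List.replicate ((32 : Int) - min 32 (max 0 p)).toNat 0) = _
  congr 1
  · congr 1; omega
  · congr 1; omega

-- ===== VERDICT (by name: the statement is the Claim_ definition above) =====
theorem cadenaBits_spec : Claim_equal_cadenaBits := by
  intro p _
  show cadenaBits p = cadenaBits_alt p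
  have h := cadenaBits_fold_eq p 32
  unfold cadenaBits
  have h32 : PySem.List.pyRange 0 (32 : Int) 1 = PySem.List.pyRange 0 ((32 : Nat) : Int) 1 := by
    norm_num
  rw [h32, h, cadenaBits_alt_eq]
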